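-- pv_equiv track=rewrite | github.com/dhwpdnr/coding_test | programmers/2023/2303/230306_1.py | solution
-- ===== SOURCE A (Python) =====
-- def solution(answers):
--     a = [1, 2, 3, 4, 5]
--     b = [2, 1, 2, 3, 2, 4, 2, 5]
--     c = [3, 3, 1, 1, 2, 2, 4, 4, 5, 5]
--     score = [0, 0, 0]
--     answer = []
--     for index, val in enumerate(answers):
--         if val == a[index % len(a)]:
--             score[0] += 1
--         if val == b[index % len(b)]:
--             score[1] += 1
--         if val == c[index % len(c)]:
--             score[2] += 1
--
--     for idx, i in enumerate(score):
--         if i == max(score):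
--             answer.append(idx + 1)
--     return answer
-- ===== SOURCE B (Python) =====
-- def solution(answers):
--     patterns = ([1, 2, 3, 4, 5],
--                 [2, 1, 2, 3, 2, 4, 2, 5],
--                 [3, 3, 1, 1, 2, 2, 4, 4, 5, 5])
--     scores = []
--     for p in patterns:
--         rot = list(p)
--         cnt = 0
--         for v in answers:
--             if v == rot[0]:
--                 cnt += 1
--             rot = rot[1:] + rot[:1]
--         scores.append(cnt)
--     best = max(scores)
--     return [i + 1 for i, s in enumerate(scores) if s == best]
-- ===== Notes on version B (the rewrite author's own statement) =====
-- stated objective: alternative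
-- what changed: Replaces A's single interleaved pass with modular indexing (pattern[i % len]) and three counters by a rotating-queue algorithm: each pattern is scanned separately with the pattern list rotated one step per answer and only its front element compared, so no index arithmetic is used at all.
import Mathlib
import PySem

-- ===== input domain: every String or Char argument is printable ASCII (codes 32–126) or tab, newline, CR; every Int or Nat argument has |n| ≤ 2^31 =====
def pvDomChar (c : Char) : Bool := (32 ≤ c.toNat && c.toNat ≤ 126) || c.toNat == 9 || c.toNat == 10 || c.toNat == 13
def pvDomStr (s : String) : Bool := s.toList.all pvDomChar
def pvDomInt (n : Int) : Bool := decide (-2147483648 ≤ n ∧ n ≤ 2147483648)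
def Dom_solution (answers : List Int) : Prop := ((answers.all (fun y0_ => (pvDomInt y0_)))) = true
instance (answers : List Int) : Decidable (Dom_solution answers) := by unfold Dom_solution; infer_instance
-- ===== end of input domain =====

-- B replaces A's modular-indexed single interleaved pass by a rotating-queue scan:
-- each pattern is rotated one step per answer and only its front is compared — no
-- index arithmetic at all; objective: alternative algorithm of the same cost.

-- ===== PORT A =====
-- one pass over enumerate(answers), a triple of counters; `x[i % len(x)]` is
-- PySem.List.pyGetD with Python's `%` (index nonneg and in range, so exact).
-- `max(score)` on the always-3-element list is ported as (max?).getD 0 (never the default).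
def solution (answers : List Int) : List Int :=
  let a : List Int := [1, 2, 3, 4, 5]
  let b : List Int := [2, 1, 2, 3, 2, 4, 2, 5]
  let c : List Int := [3, 3, 1, 1, 2, 2, 4, 4, 5, 5]
  let s := (PySem.List.enumerate answers 0).foldl
    (fun (s : Int × Int × Int) iv =>
      let s0 := if iv.2 = PySem.List.pyGetD a (PySem.Int.mod iv.1 (a.length : Int)) 0 then s.1 + 1 else s.1
      let s1 := if iv.2 = PySem.List.pyGetD b (PySem.Int.mod iv.1 (b.length : Int)) 0 then s.2.1 + 1 else s.2.1
      let s2 := if iv.2 = PySem.List.pyGetD c (PySem.Int.mod iv.1 (c.length : Int)) 0 then s.2.2 + 1 else s.2.2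
      (s0, s1, s2)) (0, 0, 0)
  let score : List Int := [s.1, s.2.1, s.2.2]
  (PySem.List.enumerate score 0).foldl
    (fun (answer : List Int) iv =>
      if iv.2 = (PySem.List.max? score (fun y => y)).getD 0 then answer ++ [iv.1 + 1] else answer) []

-- ===== PORT B =====
-- the inner loop: compare `v` with `rot[0]` (pyGetD; rot is never empty here),
-- then rotate: rot = rot[1:] + rot[:1] (PySem slices).
def pvRotScore (p : List Int) (answers : List Int) : Int :=
  (answers.foldl
    (fun (s : List Int × Int) v =>
      (PySem.List.slice s.1 (some 1) none ++ PySem.List.slice s.1 none (some 1),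
       if v = PySem.List.pyGetD s.1 0 0 then s.2 + 1 else s.2))
    (p, 0)).2

def solution_alt (answers : List Int) : List Int :=
  let patterns : List (List Int) :=
    [[1, 2, 3, 4, 5], [2, 1, 2, 3, 2, 4, 2, 5], [3, 3, 1, 1, 2, 2, 4, 4, 5, 5]]
  let scores := patterns.foldl (fun sc p => sc ++ [pvRotScore p answers]) []
  let best := (PySem.List.max? scores (fun y => y)).getD 0
  (PySem.List.enumerate scores 0).filterMap
    (fun iv => if iv.2 = best then some (iv.1 + 1) else none)

-- ===== PRECONDITION & SPEC =====
def Spec_solution (answers : List Int) (out : List Int) : Prop := out = solution_alt answers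
instance (answers : List Int) (out : List Int) : Decidable (Spec_solution answers out) := by unfold Spec_solution; infer_instance

-- ===== CLAIM (what is proved, stated in full; the proofs are below) =====
def Claim_equal_solution : Prop := ∀ (answers : List Int), Dom_solution answers → Spec_solution answers (solution answers)

-- ===== LEMMAS AND PROOFS =====

-- the pattern rotated k steps
def rotK (p : List Int) (k : Nat) : List Int :=
  p.drop (k % p.length) ++ p.take (k % p.length)

lemma rotK_head (p : List Int) (hp : p ≠ []) (k : Nat) :
    PySem.List.pyGetD (rotK p k) 0 0 = p.getD (k % p.length) 0 := by
  have hL : 0 < p.length := List.length_pos_iff.mpr hp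
  have hm : k % p.length < p.length := Nat.mod_lt _ hL
  unfold rotK
  rw [PySem.List.pyGetD_zero]
  rw [List.getD_eq_getElem _ _ (by simp; omega), List.getD_eq_getElem _ _ hm]
  rw [List.getElem_append_left (by simp; omega)]
  simp

lemma rotK_step (p : List Int) (hp : p ≠ []) (k : Nat) :
    (rotK p k).drop 1 ++ (rotK p k).take 1 = rotK p (k + 1) := by
  have hL : 0 < p.length := List.length_pos_iff.mpr hp
  set m := k % p.length with hm
  have hmlt : m < p.length := Nat.mod_lt _ hL
  have hdlen : (p.drop m).length = p.length - m := List.length_drop ..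
  have hdne : p.drop m ≠ [] := by
    intro h; have := congrArg List.length h; simp [hdlen] at this; omega
  obtain ⟨x, xs, hx⟩ := List.exists_cons_of_ne_nil hdne
  have hx0 : x = p[m] := by
    have h2 : (p.drop m)[0]'(by simp; omega) = p[m + 0]'(by omega) :=
      List.getElem_drop (xs := p) (i := m) (j := 0)
    simp only [hx, List.getElem_cons_zero] at h2
    simp only [Nat.add_zero] at h2
    exact h2
  have htakem1 : p.take (m + 1) = p.take m ++ [p[m]] := by
    rw [List.take_add_one, List.getElem?_eq_getElem hmlt]
    rfl
  by_cases hend : m + 1 < p.length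
  · have hk1 : (k + 1) % p.length = m + 1 := by
      conv_lhs => rw [← Nat.div_add_mod k p.length, ← hm]
      rw [Nat.add_assoc, Nat.mul_add_mod]
      exact Nat.mod_eq_of_lt hend
    have hdrop : p.drop m = p[m] :: p.drop (m + 1) := List.drop_eq_getElem_cons hmlt
    unfold rotK
    rw [hk1, ← hm, hdrop, htakem1]
    simp only [List.cons_append, List.drop_succ_cons, List.drop_zero, List.take_succ_cons,
      List.take_zero, List.append_assoc]
  · -- m + 1 = p.length : full cycle, back to p
    have hmeq : m + 1 = p.length := by omega
    have hk1 : (k + 1) % p.length = 0 := by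
      conv_lhs => rw [← Nat.div_add_mod k p.length, ← hm]
      rw [Nat.add_assoc, Nat.mul_add_mod, hmeq]
      simp
    have hxs : xs = [] := by
      have hlen := congrArg List.length hx
      simp [hdlen] at hlen
      exact List.length_eq_zero_iff.mp (by omega)
    unfold rotK
    rw [hk1, ← hm, hx, hxs, hx0]
    have : p.take m ++ [p[m]] = p := by rw [← htakem1, hmeq, List.take_length]
    simpa using this

-- the rotating-queue fold of B computes A's mod-indexed match count
lemma rot_count (p : List Int) (hp : p ≠ []) (l : List Int) (k : Nat) (c : Int) :
    (l.foldl
      (fun (s : List Int × Int) v =>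
        (PySem.List.slice s.1 (some 1) none ++ PySem.List.slice s.1 none (some 1),
         if v = PySem.List.pyGetD s.1 0 0 then s.2 + 1 else s.2))
      (rotK p k, c)).2
    = c + ((PySem.List.enumerate l (k : Int)).countP
        (fun iv => decide (iv.2 = PySem.List.pyGetD p (PySem.Int.mod iv.1 (p.length : Int)) 0)) : Int) := by
  induction l generalizing k c with
  | nil => simp [PySem.List.enumerate_nil]
  | cons x xs ih =>
    rw [PySem.List.enumerate_cons, List.foldl_cons, List.countP_cons]
    have hslice1 : PySem.List.slice (rotK p k) (some 1) none = (rotK p k).drop 1 := by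
      simpa using PySem.List.slice_from_natCast (rotK p k) 1
    have hslice2 : PySem.List.slice (rotK p k) none (some 1) = (rotK p k).take 1 := by
      simpa using PySem.List.slice_to_natCast (rotK p k) 1
    have hhead : PySem.List.pyGetD (rotK p k) 0 0
        = PySem.List.pyGetD p (PySem.Int.mod (k : Int) (p.length : Int)) 0 := by
      rw [rotK_head p hp k, PySem.Int.mod_natCast, PySem.List.pyGetD_natCast]
    simp only [hslice1, hslice2, rotK_step p hp k, hhead]
    have hk1 : ((k : Int) + 1) = ((k + 1 : Nat) : Int) := by push_cast; ring
    rw [hk1, ih (k + 1)]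
    by_cases h : x = PySem.List.pyGetD p (PySem.Int.mod (k : Int) (p.length : Int)) 0 <;>
      simp [h] <;> omega

-- A's interleaved counting pass, unrolled into the three per-pattern counts.
lemma foldA_eq_counts (pa pb pc : List Int) (l : List Int) (k s0 s1 s2 : Int) :
    (PySem.List.enumerate l k).foldl
      (fun (s : Int × Int × Int) iv =>
        let t0 := if iv.2 = PySem.List.pyGetD pa (PySem.Int.mod iv.1 (pa.length : Int)) 0 then s.1 + 1 else s.1
        let t1 := if iv.2 = PySem.List.pyGetD pb (PySem.Int.mod iv.1 (pb.length : Int)) 0 then s.2.1 + 1 else s.2.1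
        let t2 := if iv.2 = PySem.List.pyGetD pc (PySem.Int.mod iv.1 (pc.length : Int)) 0 then s.2.2 + 1 else s.2.2
        (t0, t1, t2)) (s0, s1, s2)
    = (s0 + ((PySem.List.enumerate l k).countP
          (fun iv => decide (iv.2 = PySem.List.pyGetD pa (PySem.Int.mod iv.1 (pa.length : Int)) 0)) : Int),
       s1 + ((PySem.List.enumerate l k).countP
          (fun iv => decide (iv.2 = PySem.List.pyGetD pb (PySem.Int.mod iv.1 (pb.length : Int)) 0)) : Int),
       s2 + ((PySem.List.enumerate l k).countP
          (fun iv => decide (iv.2 = PySem.List.pyGetD pc (PySem.Int.mod iv.1 (pc.length : Int)) 0)) : Int)) := by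
  induction l generalizing k s0 s1 s2 with
  | nil => simp [PySem.List.enumerate_nil]
  | cons x xs ih =>
    rw [PySem.List.enumerate_cons]
    simp only [List.foldl_cons, List.countP_cons, ih, Prod.mk.injEq]
    refine ⟨?_, ?_, ?_⟩ <;>
      · push_cast
        split_ifs with h <;> first | omega | simp_all

-- A's append-if loop is B's filterMap comprehension.
lemma foldl_append_if_eq_filterMap {α β : Type} (P : α → Prop) [DecidablePred P]
    (f : α → β) (l : List α) (acc : List β) :
    l.foldl (fun out x => if P x then out ++ [f x] else out) acc
      = acc ++ l.filterMap (fun x => if P x then some (f x) else none) := by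
  induction l generalizing acc with
  | nil => simp
  | cons x xs ih =>
    by_cases h : P x <;> simp [h, ih]

lemma pvRotScore_eq_count (p : List Int) (hp : p ≠ []) (answers : List Int) :
    pvRotScore p answers
      = ((PySem.List.enumerate answers 0).countP
          (fun iv => decide (iv.2 = PySem.List.pyGetD p (PySem.Int.mod iv.1 (p.length : Int)) 0)) : Int) := by
  have h0 : rotK p 0 = p := by simp [rotK]
  have := rot_count p hp answers 0 0
  rw [h0] at this
  unfold pvRotScore
  rw [this]; simp

-- ===== VERDICT =====
theorem solution_spec : Claim_equal_solution := by
  intro answers _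
  show solution answers = solution_alt answers
  unfold solution solution_alt
  simp only [foldA_eq_counts, List.foldl_cons, List.foldl_nil, List.nil_append, zero_add,
    pvRotScore_eq_count [1, 2, 3, 4, 5] (by decide) answers,
    pvRotScore_eq_count [2, 1, 2, 3, 2, 4, 2, 5] (by decide) answers,
    pvRotScore_eq_count [3, 3, 1, 1, 2, 2, 4, 4, 5, 5] (by decide) answers]
  rw [foldl_append_if_eq_filterMap]
  simp
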